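-- pv_equiv track=rewrite | github.com/zhwei59/everday_leetcode | python/679_不同的路径_III.py | uniqueWeightedPaths
-- ===== SOURCE A (Python) =====
-- def uniqueWeightedPaths(grid):
--     if not grid or not grid[0]:
--         return 0
--     m=len(grid)
--     n=len(grid[0])
--     dp=[[set([]) for i in range(n)] for __ in range(m)]
--     curr=0
--     for i  in range(m):
--         curr+=grid[i][0]
--         dp[i][0].add(curr)
--     curr=0
--     for j in range(n):
--         curr+=grid[0][j]
--         dp[0][j].add(curr)
--     for i in range(1,m):
--         for j in range(1,n):
--             up=dp[i-1][j]
--             left=dp[i][j-1]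
--             dp[i][j]=set(map(lambda x:x+grid[i][j], up.union(left)))
--     return sum(dp[m-1][n-1])
-- ===== SOURCE B (Python) =====
-- def uniqueWeightedPaths(grid):
--     if not grid or not grid[0]:
--         return 0
--     memo = {}
--
--     def paths(i, j):
--         # set of distinct path sums from (0,0) to (i,j)
--         if (i, j) in memo:
--             return memo[(i, j)]
--         v = grid[i][j]
--         if i == 0 and j == 0:
--             s = {v}
--         elif i == 0:
--             s = {x + v for x in paths(0, j - 1)}
--         elif j == 0:
--             s = {x + v for x in paths(i - 1, 0)}
--         else:
--             s = {x + v for x in paths(i - 1, j) | paths(i, j - 1)}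
--         memo[(i, j)] = s
--         return s
--
--     return sum(paths(len(grid) - 1, len(grid[0]) - 1))
-- ===== Notes on version B (the rewrite author's own statement) =====
-- stated objective: alternative
-- what changed: Replaces A's iterative bottom-up DP (pre-allocated m-by-n table, two boundary-seeding loops plus a nested fill loop) by a top-down memoized recursion paths(i,j) returning the set of distinct path sums to (i,j), with the boundaries handled as recursion base cases.
import Mathlib
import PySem

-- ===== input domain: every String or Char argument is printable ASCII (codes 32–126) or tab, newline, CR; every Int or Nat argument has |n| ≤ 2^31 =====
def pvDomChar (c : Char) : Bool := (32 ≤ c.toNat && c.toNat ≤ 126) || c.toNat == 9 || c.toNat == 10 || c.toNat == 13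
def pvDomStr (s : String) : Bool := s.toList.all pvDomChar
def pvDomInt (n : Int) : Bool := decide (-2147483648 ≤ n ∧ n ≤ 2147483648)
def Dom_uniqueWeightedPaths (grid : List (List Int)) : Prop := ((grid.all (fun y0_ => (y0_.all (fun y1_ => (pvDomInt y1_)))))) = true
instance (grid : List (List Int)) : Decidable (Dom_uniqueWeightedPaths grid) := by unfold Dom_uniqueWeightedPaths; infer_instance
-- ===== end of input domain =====

-- B replaces A's iterative bottom-up DP table by a top-down memoized recursion
-- paths(i,j) over the set of distinct path sums (memo is a pure cache, ported as plain recursion).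


-- ===== PORT A =====
-- 2D helpers for A's mutable dp table (list of lists; getD/set are exact within bounds,
-- which Pre_ guarantees for every access A makes)
def get2d (dp : List (List (PySem.Set Int))) (i j : Nat) : PySem.Set Int :=
  (dp.getD i []).getD j []

def set2d (dp : List (List (PySem.Set Int))) (i j : Nat) (s : PySem.Set Int) :
    List (List (PySem.Set Int)) :=
  dp.set i ((dp.getD i []).set j s)

def dpInit (m n : Nat) : List (List (PySem.Set Int)) :=
  (List.range m).map (fun _ => (List.range n).map (fun _ => ([] : PySem.Set Int)))

-- body of 'for i in range(m): curr += grid[i][0]; dp[i][0].add(curr)'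
def stepA1 (grid : List (List Int)) (st : Int × List (List (PySem.Set Int))) (i : Nat) :
    Int × List (List (PySem.Set Int)) :=
  let curr := st.1 + (grid.getD i []).getD 0 0
  (curr, set2d st.2 i 0 (PySem.Set.add (get2d st.2 i 0) curr))

-- body of 'for j in range(n): curr += grid[0][j]; dp[0][j].add(curr)'
def stepA2 (grid : List (List Int)) (st : Int × List (List (PySem.Set Int))) (j : Nat) :
    Int × List (List (PySem.Set Int)) :=
  let curr := st.1 + (grid.getD 0 []).getD j 0
  (curr, set2d st.2 0 j (PySem.Set.add (get2d st.2 0 j) curr))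

-- body of the inner 'for j in range(1,n)': dp[i][j] = set(map(lambda x: x+grid[i][j], up | left))
def stepA3 (grid : List (List Int)) (dp : List (List (PySem.Set Int))) (i j : Nat) :
    List (List (PySem.Set Int)) :=
  let up := get2d dp (i - 1) j
  let left := get2d dp i (j - 1)
  set2d dp i j
    (PySem.Set.ofList ((PySem.Set.union up left).map (fun x => x + (grid.getD i []).getD j 0)))

def rowA3 (grid : List (List Int)) (n : Nat) (dp : List (List (PySem.Set Int))) (i : Nat) :
    List (List (PySem.Set Int)) :=
  (List.range' 1 (n - 1)).foldl (fun dp j => stepA3 grid dp i j) dp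

def uniqueWeightedPaths (grid : List (List Int)) : Int :=
  if grid = [] ∨ grid.headD [] = [] then 0
  else
    let m := grid.length
    let n := (grid.headD []).length
    let st1 := (List.range m).foldl (stepA1 grid) ((0 : Int), dpInit m n)
    let st2 := (List.range n).foldl (stepA2 grid) ((0 : Int), st1.2)
    let dp3 := (List.range' 1 (m - 1)).foldl (rowA3 grid n) st2.2
    (get2d dp3 (m - 1) (n - 1)).sum

-- ===== PORT B =====
-- grid[i][j] (in-bounds under Pre_ for every access B makes, so getD is exact)
def gvB (grid : List (List Int)) (i j : Nat) : Int := (grid.getD i []).getD j 0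

-- B's recursive helper paths(i,j); B's memo dict only caches the pure result,
-- so the port is the same recursion without the cache (identical values)
def pathsB (grid : List (List Int)) : Nat → Nat → PySem.Set Int
  | 0, 0 => PySem.Set.ofList [gvB grid 0 0]
  | 0, j+1 => PySem.Set.ofList ((pathsB grid 0 j).map (fun x => x + gvB grid 0 (j+1)))
  | i+1, 0 => PySem.Set.ofList ((pathsB grid i 0).map (fun x => x + gvB grid (i+1) 0))
  | i+1, j+1 => PySem.Set.ofList
      ((PySem.Set.union (pathsB grid i (j+1)) (pathsB grid (i+1) j)).map
        (fun x => x + gvB grid (i+1) (j+1)))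
termination_by i j => (i, j)

def uniqueWeightedPaths_alt (grid : List (List Int)) : Int :=
  if grid = [] ∨ grid.headD [] = [] then 0
  else (pathsB grid (grid.length - 1) ((grid.headD []).length - 1)).sum

-- ===== PRECONDITION & SPEC =====
-- Pre_ excludes exactly the ragged grids on which Python A raises IndexError
-- (some row shorter than the first row, whose length A takes as the column count n;
-- A reads grid[i][j] for every j < n in every row).
def Pre_uniqueWeightedPaths (grid : List (List Int)) : Prop :=
  (grid.all (fun row => (grid.headD []).length ≤ row.length)) = true
instance (grid : List (List Int)) : Decidable (Pre_uniqueWeightedPaths grid) := by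
  unfold Pre_uniqueWeightedPaths; infer_instance

def pvWitness_uniqueWeightedPaths : List (List Int) := [[1, 2], [3, 4]]

def Spec_uniqueWeightedPaths (grid : List (List Int)) (out : Int) : Prop := out = uniqueWeightedPaths_alt grid
instance (grid : List (List Int)) (out : Int) : Decidable (Spec_uniqueWeightedPaths grid out) := by unfold Spec_uniqueWeightedPaths; infer_instance

-- ===== CLAIM (what is proved, stated in full; the proofs are below) =====
def Claim_equal_uniqueWeightedPaths : Prop := ∀ (grid : List (List Int)), Dom_uniqueWeightedPaths grid → Pre_uniqueWeightedPaths grid → Spec_uniqueWeightedPaths grid (uniqueWeightedPaths grid)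

-- ===== LEMMAS AND PROOFS =====

def sc (grid : List (List Int)) : Nat → Int
  | 0 => 0
  | t+1 => sc grid t + gvB grid t 0

def sr (grid : List (List Int)) : Nat → Int
  | 0 => 0
  | t+1 => sr grid t + gvB grid 0 t

lemma ofList_singleton (v : Int) : PySem.Set.ofList [v] = [v] := rfl

lemma pathsB_col (grid : List (List Int)) : ∀ i, pathsB grid i 0 = [sc grid (i+1)] := by
  intro i
  induction i with
  | zero => simp [pathsB, sc, ofList_singleton]
  | succ k ih => simp [pathsB, ih, sc, ofList_singleton]

lemma pathsB_row (grid : List (List Int)) : ∀ j, pathsB grid 0 j = [sr grid (j+1)] := by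
  intro j
  induction j with
  | zero => simp [pathsB, sr, ofList_singleton]
  | succ k ih => simp [pathsB, ih, sr, ofList_singleton]

def ShapeDp (dp : List (List (PySem.Set Int))) (m n : Nat) : Prop :=
  dp.length = m ∧ ∀ k, k < m → (dp.getD k []).length = n

lemma shape_set2d {dp : List (List (PySem.Set Int))} {m n : Nat} (i j : Nat)
    (s : PySem.Set Int) (h : ShapeDp dp m n) : ShapeDp (set2d dp i j s) m n := by
  obtain ⟨h1, h2⟩ := h
  refine ⟨by simp [set2d, h1], ?_⟩
  intro k hk
  by_cases hik : k = i
  · subst hik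
    have hlen : k < dp.length := by omega
    have hgk : (dp.getD k []).length = n := h2 k hk
    rw [List.getD_eq_getElem _ _ hlen] at hgk
    simp [set2d, List.getD_eq_getElem?_getD, hlen, hgk]
  · simp only [set2d, List.getD_eq_getElem?_getD, List.getElem?_set, Ne.symm hik, if_false]
    exact h2 k hk

lemma get2d_set2d {dp : List (List (PySem.Set Int))} {m n : Nat} (i j : Nat)
    (s : PySem.Set Int) (h : ShapeDp dp m n) (hi : i < m) (hj : j < n) (i' j' : Nat) :
    get2d (set2d dp i j s) i' j' = if i' = i ∧ j' = j then s else get2d dp i' j' := by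
  obtain ⟨h1, h2⟩ := h
  have hlen : i < dp.length := by omega
  have hrow : j < (dp.getD i []).length := by rw [h2 i hi]; exact hj
  have hrow' : j < dp[i].length := by rwa [List.getD_eq_getElem _ _ hlen] at hrow
  unfold get2d set2d
  by_cases hii : i' = i
  · rw [hii]
    by_cases hjj : j' = j
    · rw [hjj]
      simp [List.getD_eq_getElem?_getD, hlen, hrow']
    · simp [List.getD_eq_getElem?_getD, hlen, Ne.symm hjj, hjj]
  · simp [List.getD_eq_getElem?_getD, Ne.symm hii, hii]

lemma shape_dpInit (m n : Nat) : ShapeDp (dpInit m n) m n := by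
  refine ⟨by simp [dpInit], ?_⟩
  intro k hk
  simp [dpInit, List.getD_eq_getElem?_getD, hk]

lemma get2d_dpInit (m n i j : Nat) : get2d (dpInit m n) i j = [] := by
  unfold get2d
  simp only [dpInit, List.map_const', List.length_range, List.getD_eq_getElem?_getD,
    List.getElem?_replicate]
  split_ifs <;> simp [List.getElem?_replicate]
  split_ifs <;> simp

-- invariant of A's first seeding loop
lemma loopA1 (grid : List (List Int)) (m n : Nat) (hn : 0 < n) :
    ∀ t, t ≤ m →
      ((List.range t).foldl (stepA1 grid) ((0 : Int), dpInit m n)).1 = sc grid t ∧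
      ShapeDp ((List.range t).foldl (stepA1 grid) ((0 : Int), dpInit m n)).2 m n ∧
      ∀ i' j', get2d ((List.range t).foldl (stepA1 grid) ((0 : Int), dpInit m n)).2 i' j' =
        if j' = 0 ∧ i' < t then [sc grid (i' + 1)] else [] := by
  intro t
  induction t with
  | zero =>
    intro _
    simp only [List.range_zero, List.foldl_nil]
    refine ⟨rfl, shape_dpInit m n, ?_⟩
    intro i' j'
    simp [get2d_dpInit]
  | succ t ih =>
    intro ht
    obtain ⟨ih1, ih2, ih3⟩ := ih (by omega)
    rw [List.range_succ, List.foldl_append]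
    set st := (List.range t).foldl (stepA1 grid) ((0 : Int), dpInit m n) with hst
    have hcur : st.1 + (grid.getD t []).getD 0 0 = sc grid (t + 1) := by
      rw [ih1]; rfl
    have hempty : get2d st.2 t 0 = [] := by rw [ih3]; simp
    have hadd : PySem.Set.add (get2d st.2 t 0) (st.1 + (grid.getD t []).getD 0 0) =
        [sc grid (t + 1)] := by
      rw [hempty, PySem.Set.add_of_not_mem (List.not_mem_nil), hcur]; rfl
    refine ⟨?_, ?_, ?_⟩
    · simpa [List.foldl_cons, List.foldl_nil, stepA1] using hcur
    · simp only [List.foldl_cons, List.foldl_nil, stepA1]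
      exact shape_set2d _ _ _ ih2
    · intro i' j'
      simp only [List.foldl_cons, List.foldl_nil, stepA1]
      rw [get2d_set2d t 0 _ ih2 (by omega) hn i' j', hadd, ih3 i' j']
      split_ifs with hc1 hc2 hc3 <;> first
        | rfl
        | omega
        | (obtain ⟨e1, e2⟩ := hc1; subst e1; rfl)

-- invariant of A's second seeding loop
lemma loopA2 (grid : List (List Int)) (m n : Nat) (hm : 0 < m)
    (dp1 : List (List (PySem.Set Int))) (hS : ShapeDp dp1 m n)
    (hd : ∀ i' j', get2d dp1 i' j' = if j' = 0 ∧ i' < m then [sc grid (i' + 1)] else []) :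
    ∀ t, t ≤ n →
      ((List.range t).foldl (stepA2 grid) ((0 : Int), dp1)).1 = sr grid t ∧
      ShapeDp ((List.range t).foldl (stepA2 grid) ((0 : Int), dp1)).2 m n ∧
      ∀ i' j', get2d ((List.range t).foldl (stepA2 grid) ((0 : Int), dp1)).2 i' j' =
        if j' = 0 ∧ i' < m then [sc grid (i' + 1)]
        else if i' = 0 ∧ j' < t then [sr grid (j' + 1)] else [] := by
  intro t
  induction t with
  | zero =>
    intro _
    simp only [List.range_zero, List.foldl_nil]
    refine ⟨rfl, hS, ?_⟩
    intro i' j'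
    rw [hd i' j']
    split_ifs <;> first | rfl | omega
  | succ t ih =>
    intro ht
    obtain ⟨ih1, ih2, ih3⟩ := ih (by omega)
    rw [List.range_succ, List.foldl_append]
    set st := (List.range t).foldl (stepA2 grid) ((0 : Int), dp1) with hst
    have hcur : st.1 + (grid.getD 0 []).getD t 0 = sr grid (t + 1) := by
      rw [ih1]; rfl
    refine ⟨by simpa [List.foldl_cons, List.foldl_nil, stepA2] using hcur, ?_, ?_⟩
    · simp only [List.foldl_cons, List.foldl_nil, stepA2]
      exact shape_set2d _ _ _ ih2
    · intro i' j'
      simp only [List.foldl_cons, List.foldl_nil, stepA2]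
      rw [get2d_set2d 0 t _ ih2 hm (by omega) i' j', hcur]
      by_cases ht0 : t = 0
      · subst ht0
        have hprev : get2d st.2 0 0 = [sc grid 1] := by
          rw [ih3]; simp [hm]
        have hsrc : sr grid 1 = sc grid 1 := by simp [sr, sc]
        have hadd : PySem.Set.add (get2d st.2 0 0) (sr grid 1) = [sc grid 1] := by
          rw [hprev, PySem.Set.add_of_mem (by rw [hsrc]; exact List.mem_singleton.mpr rfl)]
        rw [hadd, ih3 i' j']
        split_ifs with hc1 hc2 hc3 hc4 <;> first
          | rfl
          | omega
          | (obtain ⟨e1, e2⟩ := hc1; subst e1; subst e2; rfl)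
      · have hprev : get2d st.2 0 t = [] := by
          rw [ih3]; simp [ht0]
        have hadd : PySem.Set.add (get2d st.2 0 t) (sr grid (t + 1)) = [sr grid (t + 1)] := by
          rw [hprev, PySem.Set.add_of_not_mem (List.not_mem_nil)]; rfl
        rw [hadd, ih3 i' j']
        split_ifs with hc1 hc2 hc3 hc4 <;> first
          | rfl
          | omega
          | (obtain ⟨e1, e2⟩ := hc1; subst e1; subst e2; rfl)

-- invariant of A's inner fill loop (row i, columns 1..t done)
lemma loopA3inner (grid : List (List Int)) (m n i : Nat) (hn : 0 < n) (hi1 : 1 ≤ i)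
    (him : i < m) (dp : List (List (PySem.Set Int))) (hS : ShapeDp dp m n)
    (hd : ∀ i' j', get2d dp i' j' =
      if (j' = 0 ∧ i' < m) ∨ (i' = 0 ∧ j' < n) ∨ (1 ≤ i' ∧ i' < i ∧ j' < n) ∨
         (i' = i ∧ j' = 0) then pathsB grid i' j' else []) :
    ∀ t, t ≤ n - 1 →
      ShapeDp ((List.range' 1 t).foldl (fun dp j => stepA3 grid dp i j) dp) m n ∧
      ∀ i' j', get2d ((List.range' 1 t).foldl (fun dp j => stepA3 grid dp i j) dp) i' j' =
        if (j' = 0 ∧ i' < m) ∨ (i' = 0 ∧ j' < n) ∨ (1 ≤ i' ∧ i' < i ∧ j' < n) ∨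
           (i' = i ∧ j' ≤ t ∧ j' < n) then pathsB grid i' j' else [] := by
  intro t
  induction t with
  | zero =>
    intro _
    simp only [List.range', List.foldl_nil]
    refine ⟨hS, ?_⟩
    intro i' j'
    rw [hd i' j']
    split_ifs <;> first | rfl | omega
  | succ t ih =>
    intro ht
    obtain ⟨ihS, ihd⟩ := ih (by omega)
    rw [List.range'_1_concat, List.foldl_append, List.foldl_cons, List.foldl_nil]
    have h1t : 1 + t = t + 1 := Nat.add_comm 1 t
    rw [h1t]
    set dpt := (List.range' 1 t).foldl (fun dp j => stepA3 grid dp i j) dp with hdpt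
    obtain ⟨ii, rfl⟩ : ∃ ii, i = ii + 1 := ⟨i - 1, by omega⟩
    have hup : get2d dpt ((ii + 1) - 1) (t + 1) = pathsB grid ii (t + 1) := by
      simp only [Nat.add_sub_cancel]
      rw [ihd ii (t + 1), if_pos (by omega)]
    have hleft : get2d dpt (ii + 1) ((t + 1) - 1) = pathsB grid (ii + 1) t := by
      simp only [Nat.add_sub_cancel]
      rw [ihd (ii + 1) t, if_pos (by omega)]
    have hnew : PySem.Set.ofList
        ((PySem.Set.union (pathsB grid ii (t + 1)) (pathsB grid (ii + 1) t)).map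
          (fun x => x + (grid.getD (ii + 1) []).getD (t + 1) 0)) =
        pathsB grid (ii + 1) (t + 1) := by
      simp [pathsB, gvB]
    refine ⟨?_, ?_⟩
    · simp only [stepA3]
      exact shape_set2d _ _ _ ihS
    · intro i' j'
      simp only [stepA3, hup, hleft, hnew]
      rw [get2d_set2d (ii + 1) (t + 1) _ ihS him (by omega) i' j']
      by_cases hc : i' = ii + 1 ∧ j' = t + 1
      · rw [if_pos hc, if_pos (by omega)]
        obtain ⟨e1, e2⟩ := hc
        rw [e1, e2]
      · rw [if_neg hc, ihd i' j']
        split_ifs <;> first | rfl | omega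

-- invariant of A's outer fill loop (rows 1..a done)
lemma loopA3outer (grid : List (List Int)) (m n : Nat) (hm : 0 < m) (hn : 0 < n)
    (dp2 : List (List (PySem.Set Int))) (hS : ShapeDp dp2 m n)
    (hd : ∀ i' j', get2d dp2 i' j' =
      if (j' = 0 ∧ i' < m) ∨ (i' = 0 ∧ j' < n) then pathsB grid i' j' else []) :
    ∀ a, a ≤ m - 1 →
      ShapeDp ((List.range' 1 a).foldl (rowA3 grid n) dp2) m n ∧
      ∀ i' j', get2d ((List.range' 1 a).foldl (rowA3 grid n) dp2) i' j' =
        if (j' = 0 ∧ i' < m) ∨ (i' = 0 ∧ j' < n) ∨ (1 ≤ i' ∧ i' ≤ a ∧ j' < n)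
        then pathsB grid i' j' else [] := by
  intro a
  induction a with
  | zero =>
    intro _
    simp only [List.range', List.foldl_nil]
    refine ⟨hS, ?_⟩
    intro i' j'
    rw [hd i' j']
    split_ifs <;> first | rfl | omega
  | succ a ih =>
    intro ha
    obtain ⟨ihS, ihd⟩ := ih (by omega)
    rw [List.range'_1_concat, List.foldl_append, List.foldl_cons, List.foldl_nil]
    have h1a : 1 + a = a + 1 := Nat.add_comm 1 a
    rw [h1a]
    set dpa := (List.range' 1 a).foldl (rowA3 grid n) dp2 with hdpa
    have hd' : ∀ i' j', get2d dpa i' j' =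
        if (j' = 0 ∧ i' < m) ∨ (i' = 0 ∧ j' < n) ∨ (1 ≤ i' ∧ i' < a + 1 ∧ j' < n) ∨
           (i' = a + 1 ∧ j' = 0) then pathsB grid i' j' else [] := by
      intro i' j'
      rw [ihd i' j']
      split_ifs <;> first | rfl | omega
    obtain ⟨S', d'⟩ := loopA3inner grid m n (a + 1) hn (by omega) (by omega) dpa ihS hd'
      (n - 1) le_rfl
    refine ⟨S', ?_⟩
    intro i' j'
    rw [rowA3]
    rw [d' i' j']
    split_ifs <;> first | rfl | omega

lemma guardA (grid : List (List Int)) (hg : grid = [] ∨ grid.headD [] = []) :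
    uniqueWeightedPaths grid = 0 := by
  unfold uniqueWeightedPaths
  rw [if_pos hg]

-- A computes the set of cell (m-1, n-1)
lemma portA_char (grid : List (List Int)) (hg : ¬(grid = [] ∨ grid.headD [] = [])) :
    uniqueWeightedPaths grid =
      (pathsB grid (grid.length - 1) ((grid.headD []).length - 1)).sum := by
  have hm : 0 < grid.length := by
    cases grid with
    | nil => exact absurd (Or.inl rfl) hg
    | cons a l => simp
  have hn : 0 < (grid.headD []).length := by
    cases h : grid.headD [] with
    | nil => exact absurd (Or.inr h) hg
    | cons a l => simp
  simp only [uniqueWeightedPaths, if_neg hg]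
  obtain ⟨h11, h12, h13⟩ := loopA1 grid grid.length (grid.headD []).length hn grid.length le_rfl
  obtain ⟨h21, h22, h23⟩ := loopA2 grid grid.length (grid.headD []).length hm _ h12 h13
    (grid.headD []).length le_rfl
  have hd0 : ∀ i' j',
      get2d ((List.range (grid.headD []).length).foldl (stepA2 grid)
        ((0 : Int), ((List.range grid.length).foldl (stepA1 grid)
          ((0 : Int), dpInit grid.length (grid.headD []).length)).2)).2 i' j' =
      if (j' = 0 ∧ i' < grid.length) ∨ (i' = 0 ∧ j' < (grid.headD []).length)
      then pathsB grid i' j' else [] := by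
    intro i' j'
    rw [h23 i' j']
    by_cases a : j' = 0 ∧ i' < grid.length
    · rw [if_pos a, if_pos (Or.inl a)]
      obtain ⟨e1, _⟩ := a
      subst e1
      rw [pathsB_col]
    · rw [if_neg a]
      by_cases b : i' = 0 ∧ j' < (grid.headD []).length
      · rw [if_pos b, if_pos (Or.inr b)]
        obtain ⟨e1, _⟩ := b
        subst e1
        rw [pathsB_row]
      · rw [if_neg b, if_neg (by tauto)]
  obtain ⟨h3S, h3d⟩ := loopA3outer grid grid.length (grid.headD []).length hm hn _ h22 hd0
    (grid.length - 1) le_rfl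
  rw [h3d (grid.length - 1) ((grid.headD []).length - 1), if_pos (by omega)]

-- ===== VERDICT (by name: the statement is the Claim_ definition above) =====
theorem uniqueWeightedPaths_spec : Claim_equal_uniqueWeightedPaths := by
  intro grid _ _
  unfold Spec_uniqueWeightedPaths
  by_cases hg : grid = [] ∨ grid.headD [] = []
  · rw [guardA grid hg]
    unfold uniqueWeightedPaths_alt
    rw [if_pos hg]
  · rw [portA_char grid hg]
    unfold uniqueWeightedPaths_alt
    rw [if_neg hg]
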